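-- pv_equiv track=rewrite | github.com/SeeSense-AK/dublin-dashboard | data/processed/tab1_hotspots/hotspot_analyzerV2.py | generate_summary_text
-- ===== SOURCE A (Python) =====
-- def generate_summary_text(theme_counts, total_reports):
--     """
--     Generate human-readable summary of common issues.
--
--     Args:
--         theme_counts: Dictionary of theme counts
--         total_reports: Total number of reports
--
--     Returns:
--         Summary string
--     """
--     if not theme_counts:
--         return "No common themes identified"
--
--     sorted_themes = sorted(theme_counts.items(), key=lambda x: x[1], reverse=True)
--     top_themes = sorted_themes[:3]
--
--     theme_labels = {
--         'left_hook': 'left-hook turning conflicts',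
--         'right_hook': 'right-hook turning conflicts',
--         'dooring': 'car door incidents',
--         'close_pass': 'close passing/overtaking',
--         'red_light': 'red light violations',
--         'pothole': 'road surface issues',
--         'poor_visibility': 'visibility problems',
--         'pedestrian_conflict': 'pedestrian conflicts',
--         'cycle_lane_blocked': 'blocked cycle lanes',
--         'junction_design': 'junction design issues',
--         'speed': 'speeding',
--         'hgv': 'HGV conflicts',
--         'taxi': 'taxi-related incidents',
--         'bus': 'bus-related incidents',
--         'luas': 'Luas/tram hazards'
--     }
--
--     summary_parts = []
--     for theme, count in top_themes:
--         label = theme_labels.get(theme, theme.replace('_', ' '))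
--         summary_parts.append(f"{label} ({count} mentions)")
--
--     return "; ".join(summary_parts)
-- ===== SOURCE B (Python) =====
-- def generate_summary_text(theme_counts, total_reports):
--     """Single bounded-insertion pass keeps only the current top-3 themes
--     (stable, descending by count) instead of sorting the whole dict."""
--     if not theme_counts:
--         return "No common themes identified"
--
--     theme_labels = {
--         'left_hook': 'left-hook turning conflicts',
--         'right_hook': 'right-hook turning conflicts',
--         'dooring': 'car door incidents',
--         'close_pass': 'close passing/overtaking',
--         'red_light': 'red light violations',
--         'pothole': 'road surface issues',
--         'poor_visibility': 'visibility problems',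
--         'pedestrian_conflict': 'pedestrian conflicts',
--         'cycle_lane_blocked': 'blocked cycle lanes',
--         'junction_design': 'junction design issues',
--         'speed': 'speeding',
--         'hgv': 'HGV conflicts',
--         'taxi': 'taxi-related incidents',
--         'bus': 'bus-related incidents',
--         'luas': 'Luas/tram hazards'
--     }
--
--     top = []
--     for item in theme_counts.items():
--         i = 0
--         while i < len(top) and top[i][1] >= item[1]:
--             i += 1
--         top.insert(i, item)
--         del top[3:]
--
--     return "; ".join(
--         f"{theme_labels.get(theme, theme.replace('_', ' '))} ({count} mentions)"
--         for theme, count in top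
--     )
-- ===== Notes on version B (the rewrite author's own statement) =====
-- stated objective: alternative
-- what changed: B replaces the full stable sort + [:3] slice with a single bounded-insertion pass that maintains only the current top-3 (count, theme) list, and formats via a generator join instead of an explicit append loop.
import Mathlib
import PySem

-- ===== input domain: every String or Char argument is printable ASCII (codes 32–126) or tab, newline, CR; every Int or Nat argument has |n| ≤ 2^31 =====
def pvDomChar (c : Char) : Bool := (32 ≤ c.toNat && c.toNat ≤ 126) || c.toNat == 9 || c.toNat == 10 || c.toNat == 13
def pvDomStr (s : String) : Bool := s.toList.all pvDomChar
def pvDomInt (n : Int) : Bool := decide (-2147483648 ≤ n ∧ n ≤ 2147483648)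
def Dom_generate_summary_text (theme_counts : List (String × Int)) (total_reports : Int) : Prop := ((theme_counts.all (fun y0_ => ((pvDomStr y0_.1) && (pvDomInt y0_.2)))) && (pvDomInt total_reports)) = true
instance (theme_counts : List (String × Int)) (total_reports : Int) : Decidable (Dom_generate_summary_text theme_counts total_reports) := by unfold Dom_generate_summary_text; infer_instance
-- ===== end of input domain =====

-- ===== PORT A =====
-- B replaces the full stable sort + slice with a single bounded top-3 insertion pass (alternative; same output).
-- the dict literal 'theme_labels', identical in both Pythons, shared by both ports
def pvThemeLabels : PySem.Dict String String := PySem.Dict.ofList [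
  ("left_hook", "left-hook turning conflicts"),
  ("right_hook", "right-hook turning conflicts"),
  ("dooring", "car door incidents"),
  ("close_pass", "close passing/overtaking"),
  ("red_light", "red light violations"),
  ("pothole", "road surface issues"),
  ("poor_visibility", "visibility problems"),
  ("pedestrian_conflict", "pedestrian conflicts"),
  ("cycle_lane_blocked", "blocked cycle lanes"),
  ("junction_design", "junction design issues"),
  ("speed", "speeding"),
  ("hgv", "HGV conflicts"),
  ("taxi", "taxi-related incidents"),
  ("bus", "bus-related incidents"),
  ("luas", "Luas/tram hazards")]

-- f"{theme_labels.get(theme, theme.replace('_',' '))} ({count} mentions)" — identical in both Pythons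
def pvFmt (p : String × Int) : String :=
  PySem.Dict.getD pvThemeLabels p.1 (PySem.Str.replace p.1 "_" " ") ++ " (" ++ PySem.Int.toStr p.2 ++ " mentions)"

def generate_summary_text (theme_counts : List (String × Int)) (total_reports : Int) : String :=
  if theme_counts = [] then "No common themes identified"
  else
    let sorted_themes := PySem.List.sorted theme_counts (fun x => x.2) true
    let top_themes := PySem.List.slice sorted_themes none (some 3)
    let summary_parts := top_themes.foldl (fun acc p => acc ++ [pvFmt p]) []
    PySem.Str.join "; " summary_parts

-- ===== PORT B =====
-- the while/insert/del body of B's loop: insert after all entries with count >= x's, keep 3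
def pvInsTop (x : String × Int) : List (String × Int) → List (String × Int)
  | [] => [x]
  | y :: ys => if x.2 ≤ y.2 then y :: pvInsTop x ys else x :: y :: ys

def generate_summary_text_alt (theme_counts : List (String × Int)) (total_reports : Int) : String :=
  if theme_counts = [] then "No common themes identified"
  else
    let top := theme_counts.foldl (fun acc x => (pvInsTop x acc).take 3) []
    PySem.Str.join "; " (top.map pvFmt)

-- ===== PRECONDITION & SPEC =====
def Spec_generate_summary_text (theme_counts : List (String × Int)) (total_reports : Int) (out : String) : Prop := out = generate_summary_text_alt theme_counts total_reports
instance (theme_counts : List (String × Int)) (total_reports : Int) (out : String) : Decidable (Spec_generate_summary_text theme_counts total_reports out) := by unfold Spec_generate_summary_text; infer_instance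

-- ===== CLAIM (what is proved, stated in full; the proofs are below) =====
def Claim_equal_generate_summary_text : Prop := ∀ (theme_counts : List (String × Int)) (total_reports : Int), Dom_generate_summary_text theme_counts total_reports → Spec_generate_summary_text theme_counts total_reports (generate_summary_text theme_counts total_reports)

-- ===== LEMMAS AND PROOFS =====
-- B's hand-written insertion is exactly the insertBy step of Python's stable reverse sort
theorem pvInsTop_eq_insertBy (x : String × Int) (ys : List (String × Int)) :
    pvInsTop x ys = PySem.List.insertBy (fun a b => decide (b.2 < a.2)) x ys := by
  induction ys with
  | nil => rfl
  | cons y t ih =>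
    simp only [pvInsTop, PySem.List.insertBy]
    by_cases h : x.2 ≤ y.2
    · rw [if_pos h, if_neg (by simpa using not_lt.mpr h), ih]
    · rw [if_neg h, if_pos (by simpa using not_le.mp h)]

-- trimming the accumulator to k before inserting does not change the trimmed result
theorem take_pvInsTop (x : String × Int) (ys : List (String × Int)) (k : Nat) :
    (pvInsTop x (ys.take k)).take k = (pvInsTop x ys).take k := by
  induction ys generalizing k with
  | nil => simp
  | cons y t ih =>
    cases k with
    | zero => simp
    | succ m =>
      simp only [List.take_succ_cons, pvInsTop]
      by_cases h : x.2 ≤ y.2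
      · rw [if_pos h, if_pos h]
        simp only [List.take_succ_cons, ih]
      · rw [if_neg h, if_neg h]
        simp only [List.take_succ_cons, List.cons.injEq, true_and]
        cases m with
        | zero => rfl
        | succ p =>
          simp only [List.take_succ_cons, List.cons.injEq, true_and]
          rw [List.take_take]
          congr 1
          omega

-- the bounded pass computes take 3 of the full insertion sort
theorem foldl_trim_eq_take (xs : List (String × Int)) (acc : List (String × Int)) :
    xs.foldl (fun a x => (pvInsTop x a).take 3) (acc.take 3)
      = (xs.foldl (fun a x => pvInsTop x a) acc).take 3 := by
  induction xs generalizing acc with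
  | nil => rfl
  | cons x t ih =>
    simp only [List.foldl_cons]
    rw [take_pvInsTop, ih]

theorem parts_eq_map (xs : List (String × Int)) (acc : List String) :
    xs.foldl (fun acc p => acc ++ [pvFmt p]) acc = acc ++ xs.map pvFmt := by
  induction xs generalizing acc with
  | nil => simp
  | cons p t ih => simp [ih]

-- ===== VERDICT (by name: the statement is the Claim_ definition above) =====
theorem generate_summary_text_spec : Claim_equal_generate_summary_text := by
  intro theme_counts total_reports _
  unfold Spec_generate_summary_text generate_summary_text generate_summary_text_alt
  by_cases h : theme_counts = []
  · simp [h]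
  · rw [if_neg h, if_neg h]
    have hsort : PySem.List.sorted theme_counts (fun x => x.2) true
        = theme_counts.foldl (fun a x => pvInsTop x a) [] := by
      rw [PySem.List.sorted_rev_eq_foldl_insertBy]
      simp only [pvInsTop_eq_insertBy]
    have htrim := foldl_trim_eq_take theme_counts []
    simp only [List.take_nil] at htrim
    show PySem.Str.join "; " (List.foldl (fun acc p => acc ++ [pvFmt p]) []
        (PySem.List.slice (PySem.List.sorted theme_counts (fun x => x.2) true) none (some 3)))
      = PySem.Str.join "; " (List.map pvFmt
        (List.foldl (fun acc x => List.take 3 (pvInsTop x acc)) [] theme_counts))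
    rw [PySem.List.slice_to _ (by omega : (0:Int) ≤ 3), hsort,
      show Int.toNat 3 = 3 from rfl, ← htrim, parts_eq_map, List.nil_append]
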